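-- pv_equiv track=rewrite | github.com/Mulindi123/Worked-Katas | day1/flicker.py | flicker
-- ===== SOURCE A (Python) =====
-- def flicker(lst):
--     result = []
--     switch = True
--
--     for word in lst:
--         if word == "flick":
--             switch = not switch
--         result.append(switch)
--
--     return result
-- ===== SOURCE B (Python) =====
-- def flicker(lst):
--     # Run-based: the "flick" positions partition lst into runs; runs get
--     # alternating booleans starting from True, each flick word opening the
--     # next run.
--     bounds = [i for i, w in enumerate(lst) if w == "flick"]
--     out = []
--     val = True
--     prev = 0
--     for b in bounds:
--         out.extend([val] * (b - prev))
--         val = not val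
--         prev = b
--     out.extend([val] * (len(lst) - prev))
--     return out
-- ===== Notes on version B (the rewrite author's own statement) =====
-- stated objective: alternative
-- what changed: Instead of toggling a boolean per word, B first collects the indices of 'flick' words and then emits whole runs of repeated booleans between consecutive flick positions, alternating starting from True.
import Mathlib
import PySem

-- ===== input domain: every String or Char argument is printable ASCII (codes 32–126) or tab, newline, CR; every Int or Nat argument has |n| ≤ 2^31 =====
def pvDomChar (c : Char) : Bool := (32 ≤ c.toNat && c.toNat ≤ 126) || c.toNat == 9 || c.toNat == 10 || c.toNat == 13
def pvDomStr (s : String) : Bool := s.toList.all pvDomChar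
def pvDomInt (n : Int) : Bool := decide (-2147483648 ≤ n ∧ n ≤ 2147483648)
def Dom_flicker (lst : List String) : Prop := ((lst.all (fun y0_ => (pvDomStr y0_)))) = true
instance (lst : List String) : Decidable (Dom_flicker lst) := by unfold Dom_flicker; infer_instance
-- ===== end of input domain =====

-- B replaces A's per-word toggle loop by a run-based decomposition: collect the "flick" indices, then emit alternating runs of repeated booleans; objective: alternative.


-- ===== PORT A =====
def flicker (lst : List String) : List Bool :=
  (lst.foldl (fun (st : List Bool × Bool) word =>
      let sw := if word == "flick" then !st.2 else st.2
      (st.1 ++ [sw], sw))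
    ([], true)).1

-- ===== PORT B =====
-- the `for b in bounds` loop of Source B, with its (out, val, prev) state; `n` is len(lst)
def flickerGo (bs : List Nat) (out : List Bool) (val : Bool) (prev : Nat) (n : Nat) : List Bool :=
  match bs with
  | [] => out ++ List.replicate (n - prev) val
  | b :: rest => flickerGo rest (out ++ List.replicate (b - prev) val) (!val) b n

def flicker_alt (lst : List String) : List Bool :=
  let bounds := (lst.zipIdx.filter (fun p => p.1 == "flick")).map (·.2)
  flickerGo bounds [] true 0 lst.length

-- ===== PRECONDITION & SPEC =====
def Spec_flicker (lst : List String) (out : List Bool) : Prop := out = flicker_alt lst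
instance (lst : List String) (out : List Bool) : Decidable (Spec_flicker lst out) := by unfold Spec_flicker; infer_instance

-- ===== CLAIM (what is proved, stated in full; the proofs are below) =====
def Claim_equal_flicker : Prop := ∀ (lst : List String), Dom_flicker lst → Spec_flicker lst (flicker lst)

-- ===== LEMMAS AND PROOFS =====

-- closed form both sides are reduced to: position i holds iff lst[:i+1] has an even number of "flick"s
def cf (lst : List String) : List Bool :=
  (List.range lst.length).map (fun i => decide ((lst.take (i + 1)).count "flick" % 2 = 0))

theorem flicker_loop (lst : List String) : ∀ (acc : List Bool) (n : Nat),
    (lst.foldl (fun (st : List Bool × Bool) word =>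
        let sw := if word == "flick" then !st.2 else st.2
        (st.1 ++ [sw], sw))
      (acc, decide (n % 2 = 0))).1
    = acc ++ (List.range lst.length).map
        (fun i => decide (((lst.take (i + 1)).count "flick" + n) % 2 = 0)) := by
  induction lst with
  | nil => simp
  | cons w t ih =>
    intro acc n
    have hsw : (if w == "flick" then !(decide (n % 2 = 0)) else decide (n % 2 = 0))
        = decide ((n + (if w == "flick" then 1 else 0)) % 2 = 0) := by
      by_cases h : w == "flick"
      · simp only [h, if_true, ← decide_not, decide_eq_decide]; omega
      · simp [h]
    simp only [List.foldl_cons, hsw]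
    rw [ih]
    simp only [List.length_cons, List.range_succ_eq_map, List.map_cons, List.map_map,
      List.append_assoc, List.singleton_append]
    congr 1
    congr 1
    · rw [decide_eq_decide]
      simp only [List.take_succ_cons, List.take_zero, List.count_cons, List.count_nil]
      by_cases h : w == "flick" <;> simp [h] <;> try omega
    apply List.map_congr_left
    intro i _
    simp only [Function.comp_apply, decide_eq_decide, List.take_succ_cons, List.count_cons]
    by_cases h : w == "flick" <;> simp [h] <;> try omega

theorem flicker_eq_cf (lst : List String) : flicker lst = cf lst := by
  have := flicker_loop lst [] 0
  simpa [flicker, cf] using this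

theorem cf_cons (w : String) (t : List String) :
    cf (w :: t) = if w == "flick" then false :: (cf t).map (!·) else true :: cf t := by
  unfold cf
  simp only [List.length_cons, List.range_succ_eq_map, List.map_cons, List.map_map]
  by_cases h : w == "flick"
  · simp only [h, if_true]
    congr 1
    · simp [List.take_succ_cons, List.count_cons, h]
    · apply List.map_congr_left
      intro i _
      simp only [Function.comp_apply, Nat.succ_eq_add_one, List.take_succ_cons,
        List.count_cons, h, if_true]
      rw [← decide_not, decide_eq_decide]
      omega
  · simp only [h, Bool.false_eq_true, if_false]
    congr 1
    · simp [List.take_succ_cons, List.count_cons, h]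
    · apply List.map_congr_left
      intro i _
      simp [Function.comp_apply, Nat.succ_eq_add_one, List.take_succ_cons, List.count_cons, h]

theorem flicker_cons (w : String) (t : List String) :
    flicker (w :: t)
      = if w == "flick" then false :: (flicker t).map (!·) else true :: flicker t := by
  rw [flicker_eq_cf, flicker_eq_cf, cf_cons]

theorem flickerGo_out (bs : List Nat) : ∀ (out : List Bool) (val : Bool) (prev n : Nat),
    flickerGo bs out val prev n = out ++ flickerGo bs [] val prev n := by
  induction bs with
  | nil => intro out val prev n; simp [flickerGo]
  | cons b rest ih =>
    intro out val prev n
    simp only [flickerGo]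
    rw [ih, ih (out := [] ++ _), List.append_assoc]
    simp

theorem flickerGo_shift (bs : List Nat) : ∀ (val : Bool) (n : Nat),
    flickerGo (bs.map (· + 1)) [] val 0 (n + 1) = val :: flickerGo bs [] val 0 n := by
  induction bs with
  | nil =>
    intro val n
    simp [flickerGo, List.replicate_succ]
  | cons b rest ih =>
    intro val n
    have shift : ∀ (bs : List Nat) (val : Bool) (prev n : Nat),
        flickerGo (bs.map (· + 1)) [] val (prev + 1) (n + 1) = flickerGo bs [] val prev n := by
      intro bs
      induction bs with
      | nil => intro val prev n; simp [flickerGo]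
      | cons c cs ihc =>
        intro val prev n
        simp only [List.map_cons, flickerGo, List.nil_append]
        rw [flickerGo_out, flickerGo_out (out := List.replicate (c - prev) val), ihc]
        congr 2
        omega
    simp only [List.map_cons, flickerGo, List.nil_append]
    rw [flickerGo_out, flickerGo_out (bs := rest) (out := List.replicate (b - 0) val), shift]
    have : b + 1 - 0 = (b - 0) + 1 := by omega
    rw [this, List.replicate_succ]
    simp

theorem flickerGo_not (bs : List Nat) : ∀ (val : Bool) (prev n : Nat),
    flickerGo bs [] val prev n = (flickerGo bs [] (!val) prev n).map (!·) := by
  induction bs with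
  | nil => intro val prev n; simp [flickerGo]
  | cons b rest ih =>
    intro val prev n
    simp only [flickerGo, List.nil_append]
    rw [flickerGo_out, flickerGo_out (out := List.replicate (b - prev) (!val))]
    rw [ih (!val) b n]
    simp

theorem flicker_alt_cons (w : String) (t : List String) :
    flicker_alt (w :: t)
      = if w == "flick" then false :: (flicker_alt t).map (!·) else true :: flicker_alt t := by
  unfold flicker_alt
  simp only [List.zipIdx_cons']
  have hmap : ((List.map (Prod.map id fun x => x + 1) t.zipIdx).filter
        (fun p => p.1 == "flick")).map (·.2)
      = (((t.zipIdx.filter (fun p => p.1 == "flick"))).map (·.2)).map (· + 1) := by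
    rw [List.filter_map, List.map_map, List.map_map]
    rfl
  by_cases h : w == "flick"
  · simp only [h, if_true, List.filter_cons, List.map_cons, List.length_cons]
    rw [hmap]
    show flickerGo (0 :: _) [] true 0 (t.length + 1) = _
    simp only [flickerGo, Nat.sub_self, List.replicate_zero, List.append_nil]
    rw [show (!true) = false from rfl, flickerGo_shift]
    rw [flickerGo_not _ false]
    rfl
  · simp only [h, Bool.false_eq_true, if_false, List.filter_cons, List.length_cons]
    rw [hmap, flickerGo_shift]

theorem flicker_eq_alt (lst : List String) : flicker lst = flicker_alt lst := by
  induction lst with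
  | nil => rfl
  | cons w t ih => rw [flicker_cons, flicker_alt_cons, ih]

-- ===== VERDICT (by name: the statement is the Claim_ definition above) =====
theorem flicker_spec : Claim_equal_flicker := by
  intro lst _
  exact flicker_eq_alt lst
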